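-- pv_equiv track=rewrite | github.com/jlee0810/Leetcode-Collection | 3474-better-compression-of-string/3474-better-compression-of-string.py | betterCompression
-- ===== SOURCE A (Python) =====
-- from collections import defaultdict
--
-- def betterCompression(compressed: str) -> str:
--     count_dic = defaultdict(int)
--
--     curr_count = 0
--     curr_char = ''
--
--     for ch in compressed:
--         if ch.isalpha():
--             if curr_char:
--                 count_dic[curr_char] += curr_count
--             curr_char = ch
--             curr_count = 0
--         else:  # ch.isnumeric()
--             curr_count = curr_count * 10 + int(ch)
--
--     # Add the last character and its count
--     if curr_char:
--         count_dic[curr_char] += curr_count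
--
--     # Build the sorted result
--     result = ''.join(f'{char}{count_dic[char]}' for char in sorted(count_dic))
--
--     return result
-- ===== SOURCE B (Python) =====
-- def betterCompression(compressed: str) -> str:
--     # Per-letter aggregation without any dict or running state machine:
--     # for each distinct letter (in sorted order), sum the values of the digit
--     # runs that directly follow each of its occurrences, parsing each run on
--     # demand by index.
--     n = len(compressed)
--
--     def run_value(i):
--         # decimal value of the digit run starting at position i (0 if empty)
--         v = 0
--         while i < n and not compressed[i].isalpha():
--             v = v * 10 + int(compressed[i])
--             i += 1
--         return v
--
--     return ''.join(
--         c + str(sum(run_value(i + 1) for i in range(n) if compressed[i] == c))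
--         for c in sorted(set(filter(str.isalpha, compressed))))
-- ===== Notes on version B (the rewrite author's own statement) =====
-- stated objective: alternative
-- what changed: Replaces A's single-pass state machine (pending letter + running Horner counter flushed into a defaultdict, then sorted keys) by a dict-free per-letter aggregation: build the sorted set of letters once, and for each letter sum the digit runs following its occurrences, parsing each run on demand by index.
import Mathlib
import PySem

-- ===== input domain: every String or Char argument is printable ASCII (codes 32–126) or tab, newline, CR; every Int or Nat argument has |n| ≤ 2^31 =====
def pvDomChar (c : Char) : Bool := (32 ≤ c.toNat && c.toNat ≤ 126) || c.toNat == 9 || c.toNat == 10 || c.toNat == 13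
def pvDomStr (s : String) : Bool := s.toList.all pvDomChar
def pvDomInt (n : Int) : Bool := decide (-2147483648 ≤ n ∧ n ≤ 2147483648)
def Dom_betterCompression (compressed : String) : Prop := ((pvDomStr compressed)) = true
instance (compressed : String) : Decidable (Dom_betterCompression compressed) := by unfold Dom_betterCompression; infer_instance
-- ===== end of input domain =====

-- B replaces A's single-pass state machine (pending letter + running counter + defaultdict)
-- by a dict-free per-letter aggregation: sorted set of letters, then for each letter the sum
-- of the digit runs following its occurrences, parsed on demand by index (objective: alternative).

-- ===== PORT A =====
-- literal port of Source A: forward scan; state = (defaultdict, curr_count, curr_char);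
-- curr_char = '' is modelled as `none`; int(ch) is PySem.Int.ofChars? on the 1-char string
-- (its .getD 0 is only reached where Python raises ValueError, which Pre_ excludes).
def betterCompression (compressed : String) : String :=
  let st := compressed.toList.foldl
    (fun (st : PySem.Dict Char Int × Int × Option Char) ch =>
      let d := st.1; let currCount := st.2.1; let currChar := st.2.2
      if PySem.Chars.isalpha ch then
        ((match currChar with
          | some c => d.modify c 0 (· + currCount)
          | none => d), 0, some ch)
      else
        (d, currCount * 10 + (PySem.Int.ofChars? [ch]).getD 0, currChar))
    (PySem.Dict.empty, 0, none)
  let d := match st.2.2 with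
    | some c => st.1.modify c 0 (· + st.2.1)
    | none => st.1
  PySem.Str.join "" ((PySem.List.sorted d.keys (fun c => c) false).map
    (fun c => String.ofList [c] ++ PySem.Int.toStr (d.getD c 0)))

-- ===== PORT B =====
-- helper of Source B's run_value: the while loop, with the accumulator v; i counts up to len.
def pvRunValue (cs : List Char) (i : Nat) (v : Int) : Int :=
  if h : i < cs.length then
    if PySem.Chars.isalpha cs[i] then v
    else pvRunValue cs (i + 1) (v * 10 + (PySem.Int.ofChars? [cs[i]]).getD 0)
  else v
termination_by cs.length - i

-- literal port of Source B: sorted set of letters; per letter, sum of run values after its occurrences.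
-- compressed[i] for i in range(n) is in range, so `getD i ' '` is exact.
def betterCompression_alt (compressed : String) : String :=
  let cs := compressed.toList
  let letters := PySem.List.sorted (PySem.Set.ofList (cs.filter PySem.Chars.isalpha)) (fun c => c) false
  PySem.Str.join "" (letters.map (fun c =>
    String.ofList [c] ++ PySem.Int.toStr
      ((((List.range cs.length).filter (fun i => cs.getD i ' ' == c)).map
        (fun i => pvRunValue cs (i + 1) 0)).sum)))

-- ===== PRECONDITION & SPEC =====
-- A raises ValueError (int(ch)) on any character that is neither a letter nor a decimal
-- digit; Pre_ admits exactly the strings A returns on (B raises on the same inputs).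
def Pre_betterCompression (compressed : String) : Prop :=
  compressed.toList.all (fun c => PySem.Chars.isalnum c) = true
instance (compressed : String) : Decidable (Pre_betterCompression compressed) := by unfold Pre_betterCompression; infer_instance
def pvWitness_betterCompression : String := "a12B3a"
def Spec_betterCompression (compressed : String) (out : String) : Prop := out = betterCompression_alt compressed
instance (compressed : String) (out : String) : Decidable (Spec_betterCompression compressed out) := by unfold Spec_betterCompression; infer_instance

-- ===== CLAIM (what is proved, stated in full; the proofs are below) =====
def Claim_equal_betterCompression : Prop := ∀ (compressed : String), Dom_betterCompression compressed → Pre_betterCompression compressed → Spec_betterCompression compressed (betterCompression compressed)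

-- ===== LEMMAS AND PROOFS =====

-- int(ch) for a single character, as both ports compute it
def pvValc (c : Char) : Int := (PySem.Int.ofChars? [c]).getD 0

-- A's loop body, A's post-loop flush, and A's output formatting, as named functions
def pvStepA (st : PySem.Dict Char Int × Int × Option Char) (ch : Char) :
    PySem.Dict Char Int × Int × Option Char :=
  let d := st.1; let currCount := st.2.1; let currChar := st.2.2
  if PySem.Chars.isalpha ch then
    ((match currChar with
      | some c => d.modify c 0 (· + currCount)
      | none => d), 0, some ch)
  else
    (d, currCount * 10 + (PySem.Int.ofChars? [ch]).getD 0, currChar)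

def pvFlush (st : PySem.Dict Char Int × Int × Option Char) : PySem.Dict Char Int :=
  match st.2.2 with
  | some c => st.1.modify c 0 (· + st.2.1)
  | none => st.1

def pvOut (d : PySem.Dict Char Int) : String :=
  PySem.Str.join "" ((PySem.List.sorted d.keys (fun c => c) false).map
    (fun c => String.ofList [c] ++ PySem.Int.toStr (d.getD c 0)))

theorem portB_closed (s : String) :
    betterCompression_alt s
      = PySem.Str.join ""
          ((PySem.List.sorted (PySem.Set.ofList (s.toList.filter PySem.Chars.isalpha)) (fun c => c) false).map
            (fun c => String.ofList [c] ++ PySem.Int.toStr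
              ((((List.range s.toList.length).filter (fun i => s.toList.getD i ' ' == c)).map
                (fun i => pvRunValue s.toList (i + 1) 0)).sum))) := rfl

-- the accumulate-into-the-dict update A performs per token
def pvUpd (d : PySem.Dict Char Int) (p : Char × Int) : PySem.Dict Char Int :=
  d.insert p.1 (d.getD p.1 0 + p.2)

theorem portA_closed (s : String) :
    betterCompression s = pvOut (pvFlush (s.toList.foldl pvStepA (PySem.Dict.empty, 0, none))) := rfl

-- the token stream A's forward machine produces: pending letter `cur` with accumulated count `cnt`
def pvToksA (cur : Option Char) (cnt : Int) : List Char → List (Char × Int)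
  | [] => match cur with | some c => [(c, cnt)] | none => []
  | ch :: t =>
    if PySem.Chars.isalpha ch then
      match cur with
      | some c => (c, cnt) :: pvToksA (some ch) 0 t
      | none => pvToksA (some ch) 0 t
    else pvToksA cur (cnt * 10 + pvValc ch) t

-- B's run value, list form: Horner continuation over the non-alpha prefix
def pvRunList (v : Int) : List Char → Int
  | [] => v
  | x :: t => if PySem.Chars.isalpha x then v else pvRunList (v * 10 + pvValc x) t

-- B's token stream, read off positions: each letter position paired with its following run value
def pvPosToks (cs : List Char) : List (Char × Int) :=
  ((List.range cs.length).filter (fun i => PySem.Chars.isalpha (cs.getD i ' '))).map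
    (fun i => (cs.getD i ' ', pvRunValue cs (i + 1) 0))

theorem pvRunValue_eq (cs : List Char) (i : Nat) (v : Int) :
    pvRunValue cs i v = pvRunList v (cs.drop i) := by
  fun_induction pvRunValue cs i v with
  | case1 i v h halpha =>
    rw [List.drop_eq_getElem_cons h, pvRunList]
    simp [halpha]
  | case2 i v h halpha ih =>
    rw [List.drop_eq_getElem_cons h, pvRunList]
    simp only [halpha, Bool.false_eq_true, if_false]
    simpa [pvValc, List.drop_succ_cons] using ih
  | case3 i v h =>
    rw [List.drop_eq_nil_of_le (by omega), pvRunList]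

theorem pvPosToks_cons (x : Char) (t : List Char) :
    pvPosToks (x :: t)
      = if PySem.Chars.isalpha x then (x, pvRunList 0 t) :: pvPosToks t else pvPosToks t := by
  unfold pvPosToks
  rw [List.length_cons, List.range_succ_eq_map]
  rw [List.filter_cons]
  have hmap : ∀ l : List Nat,
      ((l.map (· + 1)).filter (fun i => PySem.Chars.isalpha ((x :: t).getD i ' '))).map
          (fun i => ((x :: t).getD i ' ', pvRunValue (x :: t) (i + 1) 0))
        = ((l.filter (fun i => PySem.Chars.isalpha (t.getD i ' '))).map
            (fun i => (t.getD i ' ', pvRunValue t (i + 1) 0))) := by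
    intro l
    rw [List.filter_map, List.map_map]
    refine congrArg _ ?_ |>.trans (List.map_congr_left ?_)
    · exact List.filter_congr (by intro i _; simp)
    · intro i _
      simp only [Function.comp, List.getD_cons_succ]
      rw [pvRunValue_eq, pvRunValue_eq, List.drop_succ_cons]
  by_cases hx : PySem.Chars.isalpha x = true
  · simp only [List.getD_cons_zero, hx, if_true]
    rw [List.map_cons, hmap]
    simp only [List.getD_cons_zero]
    rw [pvRunValue_eq, List.drop_succ_cons, List.drop_zero]
  · have hx' : PySem.Chars.isalpha x = false := by simpa using hx
    simp only [List.getD_cons_zero, hx', Bool.false_eq_true, if_false]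
    rw [hmap]

-- the central correspondence: A's machine tokens are exactly B's positional tokens
theorem pvToksA_eq (cs : List Char) :
    ∀ cnt : Int, (pvToksA none cnt cs = pvPosToks cs)
      ∧ (∀ c : Char, pvToksA (some c) cnt cs = (c, pvRunList cnt cs) :: pvPosToks cs) := by
  induction cs with
  | nil =>
    intro cnt
    exact ⟨rfl, fun c => rfl⟩
  | cons x t ih =>
    intro cnt
    by_cases hx : PySem.Chars.isalpha x = true
    · constructor
      · rw [pvToksA, if_pos hx, (ih 0).2 x, pvPosToks_cons, if_pos hx]
      · intro c
        rw [pvToksA, if_pos hx, (ih 0).2 x, pvPosToks_cons, if_pos hx, pvRunList, if_pos hx]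
    · have hx' : PySem.Chars.isalpha x = false := by simpa using hx
      constructor
      · rw [pvToksA, hx']
        simp only [Bool.false_eq_true, if_false]
        rw [(ih _).1, pvPosToks_cons, hx']
        simp only [Bool.false_eq_true, if_false]
      · intro c
        rw [pvToksA, hx']
        simp only [Bool.false_eq_true, if_false]
        rw [(ih _).2 c, pvPosToks_cons, hx', pvRunList, hx']
        simp only [Bool.false_eq_true, if_false]

-- folding A's machine, then flushing, = the accumulate fold over A's tokens
theorem pvFoldA (cs : List Char) :
    ∀ (d : PySem.Dict Char Int) cnt cur,
      pvFlush (cs.foldl pvStepA (d, cnt, cur)) = (pvToksA cur cnt cs).foldl pvUpd d := by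
  induction cs with
  | nil =>
    intro d cnt cur
    cases cur <;> simp [pvFlush, pvToksA, pvUpd, PySem.Dict.modify]
  | cons ch t ih =>
    intro d cnt cur
    by_cases hch : PySem.Chars.isalpha ch = true
    · cases cur with
      | none =>
        simp only [List.foldl_cons, pvStepA, hch, if_true, pvToksA]
        exact ih d 0 (some ch)
      | some c =>
        simp only [List.foldl_cons, pvStepA, hch, if_true, pvToksA, List.foldl_cons]
        have h := ih (d.modify c 0 (· + cnt)) 0 (some ch)
        simpa [pvUpd, PySem.Dict.modify] using h
    · have hch' : PySem.Chars.isalpha ch = false := by simpa using hch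
      simp only [List.foldl_cons, pvStepA, hch', Bool.false_eq_true, if_false, pvToksA]
      exact ih d _ cur

-- getD after the accumulate fold: initial value plus the sum of this key's amounts
theorem pvGetD_fold (l : List (Char × Int)) :
    ∀ (d : PySem.Dict Char Int) c,
      (l.foldl pvUpd d).getD c 0
        = d.getD c 0 + ((l.filter (fun p => p.1 == c)).map (·.2)).sum := by
  induction l with
  | nil => intro d c; simp
  | cons p t ih =>
    intro d c
    simp only [List.foldl_cons]
    rw [ih]
    by_cases hc : c = p.1
    · subst hc
      simp only [pvUpd]
      rw [PySem.Dict.getD_insert_self]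
      simp [add_assoc]
    · simp only [pvUpd]
      rw [PySem.Dict.getD_insert_of_ne _ _ _ hc]
      have hb : (p.1 == c) = false := by
        simp only [beq_eq_false_iff_ne, ne_eq]
        exact fun h => hc h.symm
      simp [hb]

-- keys of B's tokens = the letters of cs, in order
theorem pvPosToks_fst (cs : List Char) :
    (pvPosToks cs).map Prod.fst = cs.filter PySem.Chars.isalpha := by
  induction cs with
  | nil => rfl
  | cons x t ih =>
    rw [pvPosToks_cons, List.filter_cons]
    by_cases hx : PySem.Chars.isalpha x = true
    · simp [hx, ih]
    · have hx' : PySem.Chars.isalpha x = false := by simpa using hx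
      simp [hx', ih]

-- the sorted keys of A's dict are B's sorted letter set
theorem pvSortedKeys_eq (cs : List Char) :
    PySem.List.sorted ((pvPosToks cs).foldl pvUpd (PySem.Dict.empty : PySem.Dict Char Int)).keys (fun c => c) false
      = PySem.List.sorted (PySem.Set.ofList (cs.filter PySem.Chars.isalpha)) (fun c => c) false := by
  apply PySem.List.sorted_eq_sorted_of_perm
  · exact fun a b h => h
  · have h1 := PySem.Dict.nodup_keys_foldl_insert_key (pvPosToks cs) (fun p => p.1)
      (fun d p => d.getD p.1 0 + p.2) (PySem.Dict.empty : PySem.Dict Char Int) PySem.Dict.nodup_keys_empty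
    rw [show pvUpd = (fun (d : PySem.Dict Char Int) (p : Char × Int) => d.insert p.1 (d.getD p.1 0 + p.2)) from rfl]
    rw [List.perm_ext_iff_of_nodup h1 (PySem.Set.nodup_ofList _)]
    intro a
    rw [PySem.Dict.keys_foldl_insert_key, PySem.Set.mem_update, PySem.Set.mem_ofList,
      ← pvPosToks_fst cs]
    simp [PySem.Dict.empty]

-- per letter, A's dict lookup is B's sum over the letter's positions
theorem pvVal_eq (cs : List Char) (c : Char) (hc : PySem.Chars.isalpha c = true) :
    ((pvPosToks cs).foldl pvUpd (PySem.Dict.empty : PySem.Dict Char Int)).getD c 0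
      = ((((List.range cs.length).filter (fun i => cs.getD i ' ' == c)).map
          (fun i => pvRunValue cs (i + 1) 0)).sum) := by
  rw [pvGetD_fold]
  have h0 : (PySem.Dict.empty : PySem.Dict Char Int).getD c 0 = 0 := by
    simp [PySem.Dict.empty, PySem.Dict.getD, PySem.Dict.get?]
  rw [h0, zero_add]
  unfold pvPosToks
  rw [List.filter_map, List.map_map, List.filter_filter]
  have hf : ∀ i ∈ List.range cs.length,
      (((fun p : Char × Int => p.1 == c) ∘ fun i => (cs.getD i ' ', pvRunValue cs (i + 1) 0)) i
          && PySem.Chars.isalpha (cs.getD i ' '))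
        = (cs.getD i ' ' == c) := by
    intro i _
    simp only [Function.comp]
    by_cases he : cs.getD i ' ' = c
    · rw [he]; simp [hc]
    · have hne : (cs.getD i ' ' == c) = false := by
        simp only [beq_eq_false_iff_ne, ne_eq]; simpa [List.getD] using he
      rw [hne]; simp
  rw [List.filter_congr hf]
  rfl

-- ===== VERDICT (by name: the statement is the Claim_ definition above) =====
theorem betterCompression_spec : Claim_equal_betterCompression := by
  intro compressed _ _
  unfold Spec_betterCompression
  rw [portA_closed, pvFoldA, (pvToksA_eq compressed.toList 0).1, portB_closed]
  unfold pvOut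
  rw [pvSortedKeys_eq]
  refine congrArg _ (List.map_congr_left ?_)
  intro c hcmem
  have hc : PySem.Chars.isalpha c = true := by
    have h1 := (PySem.List.mem_sorted _ _ _ _).mp hcmem
    have h2 := (PySem.Set.mem_ofList _ _).mp h1
    exact (List.mem_filter.mp h2).2
  rw [pvVal_eq compressed.toList c hc]
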